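-- pv_equiv track=rewrite | github.com/Zayn-InfinityBox/inCODE-NGX-Configuration-Tool | generate_presets.py | byte_to_outputs
-- ===== SOURCE A (Python) =====
-- def byte_to_outputs(data_byte, byte_index=0):
--     """
--     Convert a data byte value to list of output numbers that are set.
--
--     For byte 0: bit 7=Out1, bit 6=Out2, ..., bit 0=Out8
--     For byte 1: bit 7=Out9, bit 6=Out10 (Track mode)
--     """
--     outputs = []
--     if byte_index == 0:
--         for bit in range(8):
--             if data_byte & (1 << (7 - bit)):
--                 outputs.append(bit + 1)  # Output 1-8
--     elif byte_index == 1: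
--         if data_byte & 0x80:  # bit 7
--             outputs.append(9)
--         if data_byte & 0x40:  # bit 6
--             outputs.append(10)
--     return outputs
-- ===== SOURCE B (Python) =====
-- def byte_to_outputs(data_byte, byte_index=0):
--     # Set-bit extraction: mask the relevant bits, then peel off the highest
--     # set bit with bit_length() until none remain (no per-bit scan).
--     mask = 0xFF if byte_index == 0 else (0xC0 if byte_index == 1 else 0)
--     m = data_byte & mask
--     base = 8 * byte_index
--     outputs = []
--     while m:
--         b = m.bit_length() - 1
--         outputs.append(base + 8 - b)
--         m -= 1 << b
--     return outputs
-- ===== Notes on version B (the rewrite author's own statement) =====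
-- stated objective: alternative
-- what changed: Instead of scanning fixed bit positions with per-index branches (an 8-iteration range loop for byte 0 and two hard-coded bit tests for byte 1), B masks the relevant bits once (0xFF/0xC0/0) and then repeatedly extracts the highest set bit via bit_length(), subtracting it from the mask value until zero, so the loop runs once per SET bit rather than once per position.
import Mathlib
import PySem

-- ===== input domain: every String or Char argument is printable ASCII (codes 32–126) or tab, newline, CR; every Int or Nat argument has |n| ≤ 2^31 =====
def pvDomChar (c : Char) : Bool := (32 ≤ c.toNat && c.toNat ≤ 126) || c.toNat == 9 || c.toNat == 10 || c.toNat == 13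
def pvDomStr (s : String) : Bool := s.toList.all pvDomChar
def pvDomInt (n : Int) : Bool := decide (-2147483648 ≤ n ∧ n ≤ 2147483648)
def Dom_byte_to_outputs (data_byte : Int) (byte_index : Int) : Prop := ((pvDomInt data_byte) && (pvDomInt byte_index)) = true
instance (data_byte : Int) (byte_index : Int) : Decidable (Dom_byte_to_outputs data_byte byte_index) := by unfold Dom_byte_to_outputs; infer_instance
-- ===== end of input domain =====

-- B replaces A's branch-per-index bit scanning by set-bit extraction: mask the relevant bits,
-- then peel off the highest set bit with bit_length() until none remain; objective: alternative.

-- ===== PORT A =====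
-- '1 << (7 - bit)' ported with a Nat shift: exact since bit ∈ range(8) gives 0 ≤ 7 - bit.
def byte_to_outputs (data_byte : Int) (byte_index : Int) : List Int :=
  let outputs : List Int := []
  if byte_index == 0 then
    (PySem.List.pyRange 0 8 1).foldl (fun outputs bit =>
      if PySem.Int.band data_byte ((1 : Int) <<< (7 - bit).toNat) ≠ 0 then
        outputs ++ [bit + 1]
      else outputs) outputs
  else if byte_index == 1 then
    let outputs := if PySem.Int.band data_byte 0x80 ≠ 0 then outputs ++ [9] else outputs
    let outputs := if PySem.Int.band data_byte 0x40 ≠ 0 then outputs ++ [10] else outputs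
    outputs
  else outputs

-- ===== PORT B =====
-- 'while m:' ported with guard '0 < m': exact since m ≥ 0 throughout (m starts as
-- data_byte & mask with mask ≥ 0 and the highest set bit is subtracted each round);
-- '1 << b' uses a Nat shift amount, exact since b = m.bit_length() - 1 ≥ 0 for m > 0.
def pvAltLoop (fuel : Nat) (base : Int) (m : Int) (outputs : List Int) : List Int :=
  match fuel with
  | 0 => outputs
  | fuel + 1 =>
    if 0 < m then
      let b : Nat := PySem.Int.bitLength m - 1
      pvAltLoop fuel base (m - ((1 : Int) <<< b)) (outputs ++ [base + 8 - (b : Int)])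
    else outputs

def byte_to_outputs_alt (data_byte : Int) (byte_index : Int) : List Int :=
  let mask : Int := if byte_index == 0 then 0xFF else if byte_index == 1 then 0xC0 else 0
  let m := PySem.Int.band data_byte mask
  let base := 8 * byte_index
  -- fuel 8 bounds the while loop: m = data_byte & mask ≤ mask ≤ 255 has at most 8 set
  -- bits and each iteration clears one, so the fuel is never exhausted.
  pvAltLoop 8 base m []

-- ===== PRECONDITION & SPEC =====
def Spec_byte_to_outputs (data_byte : Int) (byte_index : Int) (out : List Int) : Prop := out = byte_to_outputs_alt data_byte byte_index
instance (data_byte : Int) (byte_index : Int) (out : List Int) : Decidable (Spec_byte_to_outputs data_byte byte_index out) := by unfold Spec_byte_to_outputs; infer_instance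

-- ===== CLAIM (what is proved, stated in full; the proofs are below) =====
def Claim_equal_byte_to_outputs : Prop := ∀ (data_byte : Int) (byte_index : Int), Dom_byte_to_outputs data_byte byte_index → Spec_byte_to_outputs data_byte byte_index (byte_to_outputs data_byte byte_index)

-- ===== LEMMAS AND PROOFS =====

-- In Nat, '&&& c' for c < 256 only reads the low 8 bits.
lemma nat_and_mod256 (a c : Nat) (hc : c < 256) : a &&& c = (a % 256) &&& c := by
  apply Nat.eq_of_testBit_eq
  intro k
  rw [Nat.testBit_and, Nat.testBit_and]
  by_cases hk : k < 8
  · have : (256 : Nat) = 2 ^ 8 := by norm_num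
    rw [this, Nat.testBit_mod_two_pow]
    simp [hk]
  · have hc' : c.testBit k = false := by
      apply Nat.testBit_eq_false_of_lt
      calc c < 256 := hc
        _ = 2 ^ 8 := by norm_num
        _ ≤ 2 ^ k := Nat.pow_le_pow_right (by omega) (by omega)
    simp [hc']

-- Python's  d & c  for a constant 0 ≤ c < 256 only depends on d mod 256.
lemma band_emod (d c : Int) (hc0 : 0 ≤ c) (hc : c < 256)
    (hneg : ∀ x : Fin 256, ((255 - x.val) &&& c.toNat : Nat) = c.toNat - (c.toNat &&& x.val)) :
    PySem.Int.band d c = PySem.Int.band (d % 256) c := by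
  have hr0 : 0 ≤ d % 256 := Int.emod_nonneg d (by norm_num)
  by_cases hd : 0 ≤ d
  · unfold PySem.Int.band
    simp only [if_pos hd, if_pos hc0, if_pos hr0]
    have h : (d % 256).toNat = d.toNat % 256 := by omega
    rw [h, ← nat_and_mod256 _ _ (by omega)]
  · unfold PySem.Int.band
    simp only [if_neg hd, if_pos hc0, if_pos hr0]
    have hrt : (d % 256).toNat = 255 - ((-d - 1).toNat % 256) := by omega
    rw [hrt]
    have h := hneg ⟨(-d - 1).toNat % 256, by omega⟩
    simp only at h
    have h2 : c.toNat &&& ((-d - 1).toNat % 256) = (-d - 1).toNat &&& c.toNat := by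
      rw [Nat.and_comm c.toNat, ← nat_and_mod256 _ _ (by omega)]
    rw [h, h2, Nat.and_comm c.toNat ((-d - 1).toNat)]

set_option maxRecDepth 100000 in
lemma hneg_pow : ∀ k : Fin 8, ∀ x : Fin 256,
    ((255 - x.val) &&& (2 ^ k.val) : Nat) = 2 ^ k.val - (2 ^ k.val &&& x.val) := by decide

lemma band_emod_pow (d : Int) (k : Nat) (hk : k < 8) :
    PySem.Int.band d ((1 : Int) <<< (k : Int)) = PySem.Int.band (d % 256) ((1 : Int) <<< (k : Int)) := by
  have hc : (1 : Int) <<< (k : Int) = (2 : Int) ^ k := by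
    have h : ((1 : Int) <<< (k : Int)) = ((Nat.shiftLeft' false 1 k : Nat) : Int) := rfl
    rw [h, Nat.shiftLeft'_false, Nat.shiftLeft_eq]
    push_cast; ring
  have hnat : ((2 : Int) ^ k).toNat = 2 ^ k := by exact_mod_cast rfl
  rw [hc]
  apply band_emod
  · positivity
  · rw [show (2 : Int) ^ k = ((2 ^ k : Nat) : Int) from by push_cast; ring]
    have hlt : (2 : Nat) ^ k < 256 := by
      calc (2 : Nat) ^ k < 2 ^ 8 := Nat.pow_lt_pow_right (by omega) hk
        _ = 256 := by norm_num
    exact_mod_cast hlt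
  · intro x
    rw [hnat]
    exact hneg_pow ⟨k, hk⟩ x

lemma A_emod_0 (d : Int) : byte_to_outputs d 0 = byte_to_outputs (d % 256) 0 := by
  unfold byte_to_outputs
  simp only [beq_self_eq_true, if_true]
  apply PySem.List.foldl_congr_mem
  intro acc bit hbit
  have hb := (PySem.List.mem_pyRange_one.mp hbit)
  rw [band_emod_pow d ((7 - bit).toNat) (by omega)]

set_option maxRecDepth 100000 in
lemma A_emod_1 (d : Int) : byte_to_outputs d 1 = byte_to_outputs (d % 256) 1 := by
  unfold byte_to_outputs
  norm_num
  rw [band_emod d 128 (by norm_num) (by norm_num) (by decide),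
      band_emod d 64 (by norm_num) (by norm_num) (by decide)]

set_option maxRecDepth 100000 in
lemma B_emod_0 (d : Int) : byte_to_outputs_alt d 0 = byte_to_outputs_alt (d % 256) 0 := by
  unfold byte_to_outputs_alt
  norm_num
  rw [band_emod d 255 (by norm_num) (by norm_num) (by decide)]

set_option maxRecDepth 100000 in
lemma B_emod_1 (d : Int) : byte_to_outputs_alt d 1 = byte_to_outputs_alt (d % 256) 1 := by
  unfold byte_to_outputs_alt
  norm_num
  rw [band_emod d 192 (by norm_num) (by norm_num) (by decide)]

set_option maxRecDepth 100000 in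
lemma AB_small_0 : ∀ x : Fin 256, byte_to_outputs (x.val : Int) 0 = byte_to_outputs_alt (x.val : Int) 0 := by decide

set_option maxRecDepth 100000 in
lemma AB_small_1 : ∀ x : Fin 256, byte_to_outputs (x.val : Int) 1 = byte_to_outputs_alt (x.val : Int) 1 := by decide

-- ===== VERDICT (by name: the statement is the Claim_ definition above) =====
theorem byte_to_outputs_spec : Claim_equal_byte_to_outputs := by
  intro d b _
  unfold Spec_byte_to_outputs
  by_cases h0 : b = 0
  · subst h0
    rw [A_emod_0, B_emod_0]
    have hr0 : 0 ≤ d % 256 := Int.emod_nonneg d (by norm_num)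
    have := AB_small_0 ⟨(d % 256).toNat, by omega⟩
    simpa [Int.toNat_of_nonneg hr0] using this
  · by_cases h1 : b = 1
    · subst h1
      rw [A_emod_1, B_emod_1]
      have hr0 : 0 ≤ d % 256 := Int.emod_nonneg d (by norm_num)
      have := AB_small_1 ⟨(d % 256).toNat, by omega⟩
      simpa [Int.toNat_of_nonneg hr0] using this
    · unfold byte_to_outputs byte_to_outputs_alt
      have b0 : (b == 0) = false := by simp [h0]
      have b1 : (b == 1) = false := by simp [h1]
      simp only [b0, b1, if_false, Bool.false_eq_true]
      rw [PySem.Int.band_zero]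
      unfold pvAltLoop
      simp
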